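-- pv_equiv track=rewrite | github.com/TadNodir/EightQueensProblem | ChessBoard.py | check_attacks
-- ===== SOURCE A (Python) =====
-- def check_attacks(board, row, col):
--     # Check if the current position is under attack
--     # Check horizontally
--     for c in range(col):
--         if board[row][c] == 1:
--             return False
--
--     # Check upper diagonal
--     r, c = row, col
--     while r >= 0 and c >= 0:
--         if board[r][c] == 1:
--             return False
--         r -= 1
--         c -= 1
--
--     # Check lower diagonal
--     r, c = row, col
--     while r < 8 and c >= 0:
--         if board[r][c] == 1:
--             return False
--         r += 1
--         c -= 1
--     return True
-- ===== SOURCE B (Python) =====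
-- def check_attacks(board, row, col):
--     # Row-major sweep: for each board row r in the attacked band, compute the
--     # column(s) of r that attack (row, col) by inverse geometry and test them.
--     lo = max(row - col, 0)
--     hi = min(row + col, 7)
--     for r in range(lo, max(hi, row) + 1):
--         if r == row:
--             for c in range(col + 1):
--                 if board[r][c] == 1:
--                     return False
--         elif r < row:
--             if board[r][col - (row - r)] == 1:
--                 return False
--         elif r < 8:
--             if board[r][col - (r - row)] == 1:
--                 return False
--     return True
-- ===== Notes on version B (the rewrite author's own statement) =====
-- stated objective: alternative
-- what changed: Inverts the traversal: instead of walking three attack rays outward from (row, col) as A does, B sweeps the board row-major over the attacked band once, computing by inverse geometry which column of each row attacks (row, col) and testing only those cells.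
-- outside the precondition, e.g. on check_attacks([[0, 0], [1, 0]], -1, 1): A returns False, B returns True; on check_attacks([[], [0, 0], [1, 0, 0]], 2, 2): A returns False, B raises IndexError
import Mathlib
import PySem

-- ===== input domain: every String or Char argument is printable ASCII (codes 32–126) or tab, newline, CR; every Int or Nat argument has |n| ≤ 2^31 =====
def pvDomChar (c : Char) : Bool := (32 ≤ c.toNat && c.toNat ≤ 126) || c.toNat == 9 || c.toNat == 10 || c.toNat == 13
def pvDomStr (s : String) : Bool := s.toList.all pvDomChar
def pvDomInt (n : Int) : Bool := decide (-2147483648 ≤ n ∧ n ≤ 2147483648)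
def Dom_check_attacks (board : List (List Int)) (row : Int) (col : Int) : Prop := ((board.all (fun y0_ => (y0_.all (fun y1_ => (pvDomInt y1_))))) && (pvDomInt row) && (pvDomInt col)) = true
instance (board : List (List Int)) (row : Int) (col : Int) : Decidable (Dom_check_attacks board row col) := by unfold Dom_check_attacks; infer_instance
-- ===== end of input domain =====

-- B sweeps the board row-major over the attacked band, computing the attacked column of each row
-- by inverse geometry, instead of walking A's three attack rays; same cost, different traversal.

-- ===== PORT A =====
-- board[r][c] (Python indexing; under Pre_ all indices hit the board, default never used)
def cellAt (board : List (List Int)) (r c : Int) : Int :=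
  (PySem.List.pyGet? ((PySem.List.pyGet? board r).getD []) c).getD 0

-- 'while r >= 0 and c >= 0: … r -= 1; c -= 1'
def upperLoop (board : List (List Int)) (r c : Int) : Bool :=
  if 0 ≤ r ∧ 0 ≤ c then
    if cellAt board r c == 1 then false else upperLoop board (r - 1) (c - 1)
  else true
termination_by (c + 1).toNat
decreasing_by omega

-- 'while r < 8 and c >= 0: … r += 1; c -= 1'
def lowerLoop (board : List (List Int)) (r c : Int) : Bool :=
  if r < 8 ∧ 0 ≤ c then
    if cellAt board r c == 1 then false else lowerLoop board (r + 1) (c - 1)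
  else true
termination_by (c + 1).toNat
decreasing_by omega

def check_attacks (board : List (List Int)) (row : Int) (col : Int) : Bool :=
  -- 'for c in range(col): if board[row][c] == 1: return False'
  ((PySem.List.pyRange 0 col 1).all (fun c => !(cellAt board row c == 1)))
    && upperLoop board row col
    && lowerLoop board row col

-- ===== PORT B =====
-- the body of B's outer loop: which cell(s) of board row r attack (row, col)
def altRow (board : List (List Int)) (row col : Int) (r : Int) : Bool :=
  if r == row then
    (PySem.List.pyRange 0 (col + 1) 1).all (fun c => !(cellAt board r c == 1))
  else if r < row then !(cellAt board r (col - (row - r)) == 1)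
  else if r < 8 then !(cellAt board r (col - (r - row)) == 1)
  else true

-- 'for r in range(lo, max(hi, row) + 1): …'
def check_attacks_alt (board : List (List Int)) (row : Int) (col : Int) : Bool :=
  (PySem.List.pyRange (max (row - col) 0) (max (min (row + col) 7) row + 1) 1).all
    (altRow board row col)

-- ===== PRECONDITION & SPEC =====
-- Pre_: when col ≥ 0, row must be ≥ 0 and every scanned cell must exist (length bounds over the
-- board's rows), so that neither Python program raises IndexError. Excluded, with A still
-- returning: row < 0 with col ≥ 0, where A's reads hit Python's accidental negative-index
-- wraparound; and inputs with a missing scanned cell on which A is rescued by meeting a queen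
-- first (B, visiting the same cells in row-major order, may raise or return there).
def Pre_check_attacks (board : List (List Int)) (row : Int) (col : Int) : Prop :=
  0 ≤ col →
    0 ≤ row ∧ row < (board.length : Int) ∧
    (∀ i : Fin board.length,
      (((i : Nat) : Int) ≤ row → row - ((i : Nat) : Int) ≤ col →
        col - (row - ((i : Nat) : Int)) < (board[i].length : Int)) ∧
      (row ≤ ((i : Nat) : Int) → ((i : Nat) : Int) < 8 → ((i : Nat) : Int) - row ≤ col →
        col - (((i : Nat) : Int) - row) < (board[i].length : Int))) ∧
    (∀ r : Fin 8, row < ((r : Nat) : Int) → ((r : Nat) : Int) - row ≤ col →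
      ((r : Nat) : Int) < (board.length : Int))
instance (board : List (List Int)) (row : Int) (col : Int) : Decidable (Pre_check_attacks board row col) := by unfold Pre_check_attacks; infer_instance

def pvWitness_check_attacks : List (List Int) × Int × Int :=
  ([[0,0,0,0,0,0,0,0],[0,0,0,0,0,0,0,0],[0,0,0,0,0,0,0,0],[0,0,0,0,0,0,0,0],
    [0,0,0,0,0,0,0,0],[0,0,0,0,0,0,0,0],[0,0,0,0,0,0,0,0],[0,0,0,0,0,0,0,0]], 3, 4)

def Spec_check_attacks (board : List (List Int)) (row : Int) (col : Int) (out : Bool) : Prop := out = check_attacks_alt board row col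
instance (board : List (List Int)) (row : Int) (col : Int) (out : Bool) : Decidable (Spec_check_attacks board row col out) := by unfold Spec_check_attacks; infer_instance

-- ===== CLAIM (what is proved, stated in full; the proofs are below) =====
def Claim_equal_check_attacks : Prop := ∀ (board : List (List Int)) (row : Int) (col : Int), Dom_check_attacks board row col → Pre_check_attacks board row col → Spec_check_attacks board row col (check_attacks board row col)

-- ===== LEMMAS AND PROOFS =====

theorem upperLoop_iff (board : List (List Int)) (r c : Int) :
    upperLoop board r c = true ↔
      ∀ d : Int, 0 ≤ d → 0 ≤ r - d → 0 ≤ c - d → cellAt board (r - d) (c - d) ≠ 1 := by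
  induction r, c using upperLoop.induct board with
  | case1 r c h hc =>
    rw [upperLoop]; simp only [if_pos h, if_pos hc, Bool.false_eq_true, false_iff]
    intro H
    exact H 0 le_rfl (by omega) (by omega) (by simpa using (beq_iff_eq.mp hc))
  | case2 r c h hc ih =>
    rw [show upperLoop board r c = upperLoop board (r - 1) (c - 1) from by
      rw [upperLoop]; simp [h, hc]]
    rw [ih]
    constructor
    · intro H d hd hr hcd
      by_cases h0 : d = 0
      · subst h0; simpa using fun e => hc (by simp [e])
      · have := H (d - 1) (by omega) (by omega) (by omega)
        simpa [show r - 1 - (d - 1) = r - d by ring, show c - 1 - (d - 1) = c - d by ring] using this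
    · intro H d hd hr hcd
      have := H (d + 1) (by omega) (by omega) (by omega)
      simpa [show r - (d + 1) = r - 1 - d by ring, show c - (d + 1) = c - 1 - d by ring] using this
  | case3 r c h =>
    rw [upperLoop]; simp only [if_neg h, true_iff]
    intro d hd hr hcd
    exact absurd (⟨by omega, by omega⟩ : (0:Int) ≤ r ∧ 0 ≤ c) h

theorem lowerLoop_iff (board : List (List Int)) (r c : Int) :
    lowerLoop board r c = true ↔
      ∀ d : Int, 0 ≤ d → r + d < 8 → 0 ≤ c - d → cellAt board (r + d) (c - d) ≠ 1 := by
  induction r, c using lowerLoop.induct board with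
  | case1 r c h hc =>
    rw [lowerLoop]; simp only [if_pos h, if_pos hc, Bool.false_eq_true, false_iff]
    intro H
    exact H 0 le_rfl (by omega) (by omega) (by simpa using (beq_iff_eq.mp hc))
  | case2 r c h hc ih =>
    rw [show lowerLoop board r c = lowerLoop board (r + 1) (c - 1) from by
      rw [lowerLoop]; simp [h, hc]]
    rw [ih]
    constructor
    · intro H d hd hr hcd
      by_cases h0 : d = 0
      · subst h0; simpa using fun e => hc (by simp [e])
      · have := H (d - 1) (by omega) (by omega) (by omega)
        simpa [show r + 1 + (d - 1) = r + d by ring, show c - 1 - (d - 1) = c - d by ring] using this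
    · intro H d hd hr hcd
      have := H (d + 1) (by omega) (by omega) (by omega)
      simpa [show r + (d + 1) = r + 1 + d by ring, show c - (d + 1) = c - 1 - d by ring] using this
  | case3 r c h =>
    rw [lowerLoop]; simp only [if_neg h, true_iff]
    intro d hd hr hcd
    exact absurd (⟨by omega, by omega⟩ : r < 8 ∧ (0:Int) ≤ c) h

theorem horiz_iff (board : List (List Int)) (row col : Int) :
    ((PySem.List.pyRange 0 col 1).all (fun c => !(cellAt board row c == 1))) = true ↔
      ∀ x : Int, 0 ≤ x → x < col → cellAt board row x ≠ 1 := by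
  simp only [List.all_eq_true, PySem.List.mem_pyRange_one]
  constructor
  · intro H x hx hxc
    have := H x ⟨hx, hxc⟩
    simpa using this
  · intro H x hx
    simpa using H x hx.1 hx.2

theorem altRow_self_iff (board : List (List Int)) (row col : Int) :
    altRow board row col row = true ↔
      ∀ x : Int, 0 ≤ x → x ≤ col → cellAt board row x ≠ 1 := by
  unfold altRow
  rw [if_pos (by simp)]
  simp only [List.all_eq_true, PySem.List.mem_pyRange_one]
  constructor
  · intro H x hx hxc
    have := H x ⟨hx, by omega⟩
    simpa using this
  · intro H x hx
    simpa using H x hx.1 (by omega)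

theorem altRow_lt (board : List (List Int)) (row col r : Int) (h : r < row) :
    altRow board row col r = !(cellAt board r (col - (row - r)) == 1) := by
  unfold altRow
  rw [if_neg (by simp; omega), if_pos h]

theorem altRow_gt (board : List (List Int)) (row col r : Int) (h1 : row < r) (h2 : r < 8) :
    altRow board row col r = !(cellAt board r (col - (r - row)) == 1) := by
  unfold altRow
  rw [if_neg (by simp; omega), if_neg (by omega), if_pos h2]

theorem alt_iff (board : List (List Int)) (row col : Int) :
    check_attacks_alt board row col = true ↔
      ∀ r : Int, max (row - col) 0 ≤ r → r < max (min (row + col) 7) row + 1 →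
        altRow board row col r = true := by
  unfold check_attacks_alt
  simp only [List.all_eq_true, PySem.List.mem_pyRange_one]
  exact ⟨fun H r h1 h2 => H r ⟨h1, h2⟩, fun H r h => H r h.1 h.2⟩

-- ===== VERDICT (by name: the statement is the Claim_ definition above) =====
theorem check_attacks_spec : Claim_equal_check_attacks := by
  intro board row col _ hpre
  show check_attacks board row col = check_attacks_alt board row col
  rw [Bool.eq_iff_iff]
  unfold check_attacks
  rw [Bool.and_eq_true, Bool.and_eq_true, horiz_iff, upperLoop_iff, lowerLoop_iff, alt_iff]
  by_cases hcol : 0 ≤ col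
  case neg =>
    -- col < 0: A's three scans are vacuous and B's row band is empty
    constructor
    · intro _ r h1 h2
      exact absurd h2 (by omega)
    · intro _
      refine ⟨⟨fun x hx hxc => by omega, fun d hd hr hcd => by omega⟩,
        fun d hd hr hcd => by omega⟩
  case pos =>
    obtain ⟨hrow, -, -⟩ := hpre hcol
    constructor
    · -- A's three rays clear → every row of B's band is clear
      rintro ⟨⟨H, U⟩, L⟩ r h1 h2
      rcases lt_trichotomy r row with hr | hr | hr
      · rw [altRow_lt board row col r hr]
        have := U (row - r) (by omega) (by omega) (by omega)
        simpa [show row - (row - r) = r by ring] using this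
      · subst hr
        rw [altRow_self_iff]
        intro x hx hxc
        rcases eq_or_lt_of_le hxc with h | h
        · subst h
          have := U 0 le_rfl (by omega) (by omega)
          simpa using this
        · exact H x hx h
      · by_cases h8 : r < 8
        · rw [altRow_gt board row col r hr h8]
          have := L (r - row) (by omega) (by omega) (by omega)
          simpa [show row + (r - row) = r by ring] using this
        · unfold altRow
          rw [if_neg (by simp; omega), if_neg (by omega), if_neg h8]
    · -- B's band clear → A's three rays are clear
      intro B
      have hself : ∀ x : Int, 0 ≤ x → x ≤ col → cellAt board row x ≠ 1 := by
        rw [← altRow_self_iff]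
        exact B row (by omega) (by omega)
      refine ⟨⟨fun x hx hxc => hself x hx (by omega), fun d hd hr hcd => ?_⟩,
        fun d hd hr hcd => ?_⟩
      · -- upper-left cell (row - d, col - d)
        by_cases h0 : d = 0
        · subst h0; simpa using hself col hcol le_rfl
        · have := B (row - d) (by omega) (by omega)
          rw [altRow_lt board row col (row - d) (by omega)] at this
          simpa [show row - (row - d) = d by ring] using this
      · -- lower-left cell (row + d, col - d)
        by_cases h0 : d = 0
        · subst h0; simpa using hself col hcol le_rfl
        · have := B (row + d) (by omega) (by omega)
          rw [altRow_gt board row col (row + d) (by omega) (by omega)] at this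
          simpa [show row + d - row = d by ring] using this
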